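-- pv_equiv track=rewrite | github.com/sdeep27/spaceshift | src/spaceshift/cli.py | _calculate_tree_count
-- ===== SOURCE A (Python) =====
-- def _calculate_tree_count(n_list):
--     """Total prompts for a direction given its n array. Returns (total, breakdown_str)."""
--     if not n_list:
--         return 0, ""
--     parts = []
--     running = 1
--     total = 0
--     for num in n_list:
--         running *= num
--         parts.append(str(running))
--         total += running
--     return total, " + ".join(parts)
-- ===== SOURCE B (Python) =====
-- def _calculate_tree_count(n_list):
--     """Total prompts for a direction given its n array. Returns (total, breakdown_str)."""
--     total = 0
--     for num in reversed(n_list):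
--         total = num * (1 + total)
--     breakdown = ""
--     running = 1
--     for num in n_list:
--         running *= num
--         breakdown = str(running) if not breakdown else breakdown + " + " + str(running)
--     return total, breakdown
-- ===== Notes on version B (the rewrite author's own statement) =====
-- stated objective: alternative
-- what changed: The total is computed by Horner's rule over the reversed list (total = num*(1+total), right-to-left, no prefix products stored or summed), and the breakdown is a second, separate pass that concatenates the piece strings directly instead of A's single fused loop that stores a parts list and joins it.
import Mathlib
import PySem

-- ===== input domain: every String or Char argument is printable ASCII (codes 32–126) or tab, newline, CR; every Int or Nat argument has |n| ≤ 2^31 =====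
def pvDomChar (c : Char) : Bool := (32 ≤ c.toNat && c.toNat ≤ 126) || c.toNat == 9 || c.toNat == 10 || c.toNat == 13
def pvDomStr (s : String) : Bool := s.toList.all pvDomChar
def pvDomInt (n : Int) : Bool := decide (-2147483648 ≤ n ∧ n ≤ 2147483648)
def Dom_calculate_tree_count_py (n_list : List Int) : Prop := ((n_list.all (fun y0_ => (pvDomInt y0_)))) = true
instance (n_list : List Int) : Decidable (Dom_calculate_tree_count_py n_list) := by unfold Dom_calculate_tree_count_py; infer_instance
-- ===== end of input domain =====

-- B computes the total by Horner's rule over the reversed list and builds the breakdown by a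
-- separate recursive descent; A's fused forward loop with a stored parts list is replaced.

-- ===== PORT A =====
-- A: single fused loop keeping parts / running / total, with an early return on [].
def pvFoldA (n_list : List Int) : List String × Int × Int :=
  n_list.foldl (fun (s : List String × Int × Int) num =>
    let running := s.2.1 * num
    (s.1 ++ [PySem.Int.toStr running], running, s.2.2 + running)) ([], 1, 0)

def calculate_tree_count_py (n_list : List Int) : Int × String :=
  if n_list = [] then (0, "")
  else
    let st := pvFoldA n_list
    (st.2.2, PySem.Str.join " + " st.1)

-- ===== PORT B =====
-- B: Horner's rule over the reversed list for the total, then a separate direct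
-- string-concatenation pass for the breakdown (Python string concatenation is exact
-- list-of-codepoints concatenation; PySem.Int.toChars = str(n)).
def calculate_tree_count_py_alt (n_list : List Int) : Int × String :=
  let total := n_list.reverse.foldl (fun total num => num * (1 + total)) 0
  let st := n_list.foldl (fun (p : List Char × Int) num =>
    let running := p.2 * num
    ((if p.1 = [] then PySem.Int.toChars running
      else p.1 ++ " + ".toList ++ PySem.Int.toChars running), running)) ([], 1)
  (total, String.ofList st.1)

-- ===== PRECONDITION & SPEC =====
def Spec_calculate_tree_count_py (n_list : List Int) (out : Int × String) : Prop := out = calculate_tree_count_py_alt n_list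
instance (n_list : List Int) (out : Int × String) : Decidable (Spec_calculate_tree_count_py n_list out) := by unfold Spec_calculate_tree_count_py; infer_instance

-- ===== CLAIM =====
def Claim_equal_calculate_tree_count_py : Prop := ∀ (n_list : List Int), Dom_calculate_tree_count_py n_list → Spec_calculate_tree_count_py n_list (calculate_tree_count_py n_list)

-- ===== LEMMAS AND PROOFS =====
-- Proof-side helper: the list of prefix products seeded with r.
def pvAccumMul (r : Int) : List Int → List Int
  | [] => []
  | x :: xs => (r * x) :: pvAccumMul (r * x) xs

theorem foldA_parts (xs : List Int) : ∀ (parts : List String) (r total : Int),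
    (xs.foldl (fun (s : List String × Int × Int) num =>
      let running := s.2.1 * num
      (s.1 ++ [PySem.Int.toStr running], running, s.2.2 + running)) (parts, r, total)).1
    = parts ++ (pvAccumMul r xs).map PySem.Int.toStr := by
  induction xs with
  | nil => intro parts r total; simp [pvAccumMul]
  | cons x xs ih =>
    intro parts r total
    simp only [List.foldl_cons, pvAccumMul, List.map_cons]
    rw [ih]; simp

theorem foldA_total (xs : List Int) : ∀ (parts : List String) (r total : Int),
    (xs.foldl (fun (s : List String × Int × Int) num =>
      let running := s.2.1 * num
      (s.1 ++ [PySem.Int.toStr running], running, s.2.2 + running)) (parts, r, total)).2.2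
    = total + (pvAccumMul r xs).sum := by
  induction xs with
  | nil => intro parts r total; simp [pvAccumMul]
  | cons x xs ih =>
    intro parts r total
    simp only [List.foldl_cons, pvAccumMul]
    rw [ih]; simp [List.sum_cons]; ring

-- Sum of seeded prefix products = seed times Horner value.
theorem accum_sum_horner (xs : List Int) : ∀ (r : Int),
    (pvAccumMul r xs).sum = r * xs.foldr (fun x a => x * (1 + a)) 0 := by
  induction xs with
  | nil => intro r; simp [pvAccumMul]
  | cons x xs ih =>
    intro r
    simp only [pvAccumMul, List.sum_cons, List.foldr_cons]
    rw [ih]; ring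

theorem toChars_ne_nil (n : Int) : PySem.Int.toChars n ≠ [] := by
  unfold PySem.Int.toChars; split
  · simp
  · intro h
    have := Nat.length_toDigits_pos (b := 10) (n := n.toNat)
    simp [h] at this

theorem join_shift (sep acc h : List Char) (L : List (List Char)) :
    PySem.Chars.join sep ((acc ++ sep ++ h) :: L)
      = acc ++ sep ++ PySem.Chars.join sep (h :: L) := by
  cases L with
  | nil => simp [PySem.Chars.join_singleton]
  | cons q L =>
    rw [PySem.Chars.join_cons_cons, PySem.Chars.join_cons_cons]
    simp [List.append_assoc]

theorem foldB_go (xs : List Int) : ∀ (r : Int) (acc : List Char), acc ≠ [] →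
    (xs.foldl (fun (p : List Char × Int) num =>
      ((if p.1 = [] then PySem.Int.toChars (p.2 * num)
        else p.1 ++ " + ".toList ++ PySem.Int.toChars (p.2 * num)), p.2 * num)) (acc, r)).1
    = PySem.Chars.join (" + ".toList) (acc :: (pvAccumMul r xs).map PySem.Int.toChars) := by
  induction xs with
  | nil => intro r acc _; simp [pvAccumMul, PySem.Chars.join_singleton]
  | cons x xs ih =>
    intro r acc hacc
    simp only [List.foldl_cons, pvAccumMul, List.map_cons, if_neg hacc]
    rw [ih (r * x) _ (by simp)]
    rw [join_shift, PySem.Chars.join_cons_cons]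

-- ===== VERDICT =====
theorem calculate_tree_count_py_spec : Claim_equal_calculate_tree_count_py := by
  intro n_list _
  unfold Spec_calculate_tree_count_py calculate_tree_count_py calculate_tree_count_py_alt pvFoldA
  cases n_list with
  | nil => decide
  | cons x xs =>
    simp only [if_neg (List.cons_ne_nil x xs)]
    rw [foldA_total, foldA_parts, List.foldl_reverse]
    refine Prod.ext ?_ ?_
    · simp only
      rw [accum_sum_horner]
      simp
    · simp only [List.nil_append, List.foldl_cons]
      rw [← String.toList_inj]
      rw [PySem.Str.join]
      simp only [String.toList_ofList, List.map_map, if_true]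
      have hm : (String.toList ∘ PySem.Int.toStr) = PySem.Int.toChars := by
        funext m; exact PySem.Int.toList_toStr m
      rw [hm]
      rw [foldB_go xs (1 * x) (PySem.Int.toChars (1 * x)) (toChars_ne_nil _)]
      simp [pvAccumMul]
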